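-- pv_equiv track=rewrite | github.com/DeltaHarbinger/Analysis-of-Algorithms-Project | project_remake.py | column_scan
-- ===== SOURCE A (Python) =====
-- def get_column(matrix, column_number):
-- 	column = []
-- 	for row in matrix:
-- 		column.append(row[column_number])
-- 	return column
--
-- def column_scan(matrix, eliminated_rows):
-- 	column_scan_results = []
-- 	for i, row in enumerate(matrix):
-- 		if eliminated_rows[i] == -1:
-- 			column = get_column(matrix, i)
-- 			if column.count(0) == 1 and column.index(0) not in column_scan_results:
-- 				column_scan_results.append(column.index(0))
-- 			else:
-- 				column_scan_results.append(-1)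
-- 		else:
-- 			column_scan_results.append(-1)
-- 	return column_scan_results
-- ===== SOURCE B (Python) =====
-- def column_scan(matrix, eliminated_rows):
--     # One row-major pass builds (count of zeros, first-zero row) per needed column,
--     # then a second pass over column indices assembles the result with a 'seen' set.
--     n = len(matrix)
--     stats = [(i, 0, -1) for i in range(n) if eliminated_rows[i] == -1]
--     for r, row in enumerate(matrix):
--         stats = [(i,
--                   cnt + 1 if row[i] == 0 else cnt,
--                   r if row[i] == 0 and first == -1 else first)
--                  for (i, cnt, first) in stats]
--     lookup = {i: (cnt, first) for (i, cnt, first) in stats}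
--     seen = set()
--     result = []
--     for i in range(n):
--         st = lookup.get(i)
--         if st is None:
--             result.append(-1)
--         else:
--             cnt, first = st
--             if cnt == 1 and first not in seen:
--                 result.append(first)
--                 seen.add(first)
--             else:
--                 result.append(-1)
--     return result
-- ===== Notes on version B (the rewrite author's own statement) =====
-- stated objective: alternative
-- what changed: A extracts each column separately and runs count/index/membership passes per column; B makes one row-major pass building (zero-count, first-zero-row) statistics for all non-eliminated columns at once, then assembles the result in a second pass over column indices using a dict lookup and a 'seen' set instead of scanning the growing result list.
import Mathlib
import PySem

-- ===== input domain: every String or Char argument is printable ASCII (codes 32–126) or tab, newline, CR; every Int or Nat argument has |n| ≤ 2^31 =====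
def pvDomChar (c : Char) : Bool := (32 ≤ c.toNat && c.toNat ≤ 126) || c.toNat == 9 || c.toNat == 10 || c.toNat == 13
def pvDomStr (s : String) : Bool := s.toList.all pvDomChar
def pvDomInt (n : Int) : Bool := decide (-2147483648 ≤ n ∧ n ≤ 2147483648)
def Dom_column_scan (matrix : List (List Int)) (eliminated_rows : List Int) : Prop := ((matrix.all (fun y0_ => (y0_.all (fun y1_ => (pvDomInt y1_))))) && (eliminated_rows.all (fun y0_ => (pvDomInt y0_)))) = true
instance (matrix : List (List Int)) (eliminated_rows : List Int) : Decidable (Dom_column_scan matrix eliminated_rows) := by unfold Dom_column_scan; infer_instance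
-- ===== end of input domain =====

-- B replaces A's per-column extraction with one row-major statistics pass plus a
-- second assembly pass over column indices (alternative decomposition, same results).

-- ===== PORT A =====
def pvGetColumn (matrix : List (List Int)) (c : Int) : List Int :=
  matrix.foldl (fun col row => col ++ [(PySem.List.pyGet? row c).getD 0]) []

def column_scan (matrix : List (List Int)) (eliminated_rows : List Int) : List Int :=
  (PySem.List.enumerate matrix 0).foldl (fun res p =>
    if (PySem.List.pyGet? eliminated_rows p.1).getD 0 = -1 then
      let column := pvGetColumn matrix p.1
      if PySem.List.count column 0 = 1 ∧
         (((PySem.List.index? column 0).getD 0 : Nat) : Int) ∉ res then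
        res ++ [(((PySem.List.index? column 0).getD 0 : Nat) : Int)]
      else res ++ [-1]
    else res ++ [-1]) []

-- ===== PORT B =====
-- one row-major pass: per needed column (index, zero count, first-zero row or -1)
def column_scan_alt (matrix : List (List Int)) (eliminated_rows : List Int) : List Int :=
  let n : Int := matrix.length
  let stats0 : List (Int × Int × Int) :=
    ((PySem.List.pyRange 0 n 1).filter
      (fun i => (PySem.List.pyGet? eliminated_rows i).getD 0 == -1)).map (fun i => (i, 0, -1))
  let stats := (PySem.List.enumerate matrix 0).foldl
    (fun st p => st.map (fun q =>
      (q.1,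
       if (PySem.List.pyGet? p.2 q.1).getD 0 = 0 then q.2.1 + 1 else q.2.1,
       if (PySem.List.pyGet? p.2 q.1).getD 0 = 0 ∧ q.2.2 = -1 then p.1 else q.2.2))) stats0
  let lookup : PySem.Dict Int (Int × Int) :=
    PySem.Dict.ofList (stats.map (fun q => (q.1, (q.2.1, q.2.2))))
  (((PySem.List.pyRange 0 n 1).foldl
    (fun (acc : List Int × PySem.Set Int) i =>
      match lookup.get? i with
      | none => (acc.1 ++ [-1], acc.2)
      | some st =>
        if st.1 = 1 ∧ ¬ PySem.Set.contains acc.2 st.2 then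
          (acc.1 ++ [st.2], PySem.Set.add acc.2 st.2)
        else (acc.1 ++ [-1], acc.2))
    ([], PySem.Set.empty)) : List Int × PySem.Set Int).1

-- ===== PRECONDITION & SPEC =====
-- Pre_ excludes exactly the inputs on which the Python A raises IndexError:
-- eliminated_rows shorter than matrix, or some non-eliminated column index
-- out of range for some row (ragged/short rows).
def Pre_column_scan (matrix : List (List Int)) (eliminated_rows : List Int) : Prop :=
  matrix.length ≤ eliminated_rows.length ∧
  ∀ i : Nat, i < matrix.length → eliminated_rows[i]? = some (-1) →
    ∀ row ∈ matrix, i < row.length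
instance (matrix : List (List Int)) (eliminated_rows : List Int) : Decidable (Pre_column_scan matrix eliminated_rows) := by unfold Pre_column_scan; infer_instance

def pvWitness_column_scan : List (List Int) × List Int := ([[0, 1], [1, 0]], [-1, -1])

def Spec_column_scan (matrix : List (List Int)) (eliminated_rows : List Int) (out : List Int) : Prop := out = column_scan_alt matrix eliminated_rows
instance (matrix : List (List Int)) (eliminated_rows : List Int) (out : List Int) : Decidable (Spec_column_scan matrix eliminated_rows out) := by unfold Spec_column_scan; infer_instance

-- ===== CLAIM (what is proved, stated in full; the proofs are below) =====
def Claim_equal_column_scan : Prop := ∀ (matrix : List (List Int)) (eliminated_rows : List Int), Dom_column_scan matrix eliminated_rows → Pre_column_scan matrix eliminated_rows → Spec_column_scan matrix eliminated_rows (column_scan matrix eliminated_rows)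

-- ===== LEMMAS AND PROOFS =====

-- the column as a map, and the two statistics A recomputes per column
def pvColv (matrix : List (List Int)) (i : Int) : List Int :=
  matrix.map (fun row => (PySem.List.pyGet? row i).getD 0)
def pvCnt (matrix : List (List Int)) (i : Int) : Int :=
  ((pvColv matrix i).count 0 : Int)
def pvFirst (matrix : List (List Int)) (i : Int) : Int :=
  match PySem.List.index? (pvColv matrix i) 0 with
  | some k => (k : Int)
  | none => -1

theorem pvGetColumn_eq (matrix : List (List Int)) (i : Int) :
    pvGetColumn matrix i = pvColv matrix i := by
  simpa [pvGetColumn, pvColv] using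
    PySem.List.foldl_append_singleton_eq_map (fun row => (PySem.List.pyGet? row i).getD 0) matrix []

-- a fold that maps the whole state list each step is a map of per-element folds
theorem pvFoldlMap {α β : Type} (g : β → α → α) (rows : List β) (l : List α) :
    rows.foldl (fun st p => st.map (g p)) l = l.map (fun q => rows.foldl (fun q p => g p q) q) := by
  induction rows generalizing l with
  | nil => simp
  | cons r rows ih => simp [List.foldl_cons, ih, List.map_map, Function.comp]

-- the per-column statistics fold, first-zero already found
theorem pvStatsFoldNe (ms : List (List Int)) (i : Int) :
    ∀ (s cnt f : Int), f ≠ -1 →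
    (PySem.List.enumerate ms s).foldl
      (fun (q : Int × Int × Int) (p : Int × List Int) =>
        (q.1, if (PySem.List.pyGet? p.2 q.1).getD 0 = 0 then q.2.1 + 1 else q.2.1,
         if (PySem.List.pyGet? p.2 q.1).getD 0 = 0 ∧ q.2.2 = -1 then p.1 else q.2.2)) (i, cnt, f)
    = (i, cnt + ((pvColv ms i).count 0 : Int), f) := by
  induction ms with
  | nil => intro s cnt f hf; simp [PySem.List.enumerate_nil, pvColv]
  | cons row ms ih =>
    intro s cnt f hf
    rw [PySem.List.enumerate_cons, List.foldl_cons]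
    by_cases hv : (PySem.List.pyGet? row i).getD 0 = 0
    · simp only [hv, hf, and_false, if_true, if_false, ite_true, ite_false]
      rw [ih (s+1) (cnt+1) f hf]
      have hc : (List.count 0 (pvColv (row :: ms) i) : Int)
          = (List.count 0 (pvColv ms i) : Int) + 1 := by
        simp [pvColv, List.count_cons, hv]
      rw [hc]; ring_nf
    · simp only [hv, false_and, ite_false, if_false]
      rw [ih (s+1) cnt f hf]
      simp [pvColv, List.count_cons, hv]

-- the per-column statistics fold from the initial (cnt, -1) state
theorem pvStatsFold (ms : List (List Int)) (i : Int) :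
    ∀ (s cnt : Int), 0 ≤ s →
    (PySem.List.enumerate ms s).foldl
      (fun (q : Int × Int × Int) (p : Int × List Int) =>
        (q.1, if (PySem.List.pyGet? p.2 q.1).getD 0 = 0 then q.2.1 + 1 else q.2.1,
         if (PySem.List.pyGet? p.2 q.1).getD 0 = 0 ∧ q.2.2 = -1 then p.1 else q.2.2)) (i, cnt, -1)
    = (i, cnt + ((pvColv ms i).count 0 : Int),
       match PySem.List.index? (pvColv ms i) 0 with
       | some k => s + (k : Int)
       | none => -1) := by
  induction ms with
  | nil => intro s cnt hs; simp [PySem.List.enumerate_nil, pvColv, PySem.List.index?]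
  | cons row ms ih =>
    intro s cnt hs
    rw [PySem.List.enumerate_cons, List.foldl_cons]
    by_cases hv : (PySem.List.pyGet? row i).getD 0 = 0
    · have hs' : s ≠ -1 := by omega
      simp only [hv, true_and, ite_true]
      rw [pvStatsFoldNe ms i (s+1) (cnt+1) s hs']
      have hcol : pvColv (row :: ms) i = 0 :: pvColv ms i := by simp [pvColv, hv]
      rw [hcol, PySem.List.index?_cons_self]
      have hc : (List.count 0 ((0 : Int) :: pvColv ms i) : Int)
          = (List.count 0 (pvColv ms i) : Int) + 1 := by
        simp [List.count_cons]
      rw [hc]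
      simp only [Nat.cast_zero, add_zero]
      ring_nf
    · simp only [hv, false_and, ite_false, if_false]
      rw [ih (s+1) cnt (by omega)]
      have hcol : pvColv (row :: ms) i
          = (PySem.List.pyGet? row i).getD 0 :: pvColv ms i := by simp [pvColv]
      rw [hcol, PySem.List.index?_cons_of_ne _ hv]
      have hcnt : List.count 0 ((PySem.List.pyGet? row i).getD 0 :: pvColv ms i)
          = List.count 0 (pvColv ms i) := by
        simp [List.count_cons, hv]
      rw [hcnt]
      cases PySem.List.index? (pvColv ms i) 0 with
      | none => simp
      | some k =>
        simp only [Option.map_some]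
        push_cast
        ring_nf

-- lookup into a dict built from distinct keys
theorem pvGetOfListMap {ν : Type} (L : List Int) (g : Int → ν) (hnd : L.Nodup) (x : Int) :
    (PySem.Dict.ofList (L.map (fun i => (i, g i)))).get? x
      = if x ∈ L then some (g x) else none := by
  have hitems : (PySem.Dict.ofList (L.map (fun i => (i, g i)))).items
      = L.map (fun i => (i, g i)) := by
    have := PySem.Dict.items_foldl_insert_fresh (l := L) (k := fun i => i) (v := fun i => g i)
      (d := PySem.Dict.empty) (by intro a _; exact PySem.Dict.contains_empty a)
      (by simpa [Function.comp_def] using hnd)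
    simpa [PySem.Dict.ofList, PySem.Dict.update, List.foldl_map, PySem.Dict.empty,
      Function.comp_def] using this
  have hkeys : (PySem.Dict.ofList (L.map (fun i => (i, g i)))).keys = L := by
    simp [PySem.Dict.keys, hitems, List.map_map, Function.comp_def]
  by_cases hx : x ∈ L
  · rw [if_pos hx]
    apply PySem.Dict.get?_of_mem_items
    · rw [hitems]; exact List.mem_map.2 ⟨x, hx, rfl⟩
    · rw [hkeys]; exact hnd
  · rw [if_neg hx]
    rw [PySem.Dict.get?_eq_none_iff_not_mem_keys]
    rw [hkeys]; exact hx

-- the two result-assembly loops agree, given the dict characterization and the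
-- invariant that 'seen' holds exactly the nonnegative entries of the result so far
theorem pvLoop (matrix : List (List Int)) (eliminated_rows : List Int)
    (lookup : PySem.Dict Int (Int × Int))
    (hget : ∀ x : Int, lookup.get? x
      = if ((PySem.List.pyGet? eliminated_rows x).getD 0 = -1 ∧
            x ∈ PySem.List.pyRange 0 (matrix.length : Int) 1)
        then some (pvCnt matrix x, pvFirst matrix x) else none) :
    ∀ (L : List Int), (∀ i ∈ L, i ∈ PySem.List.pyRange 0 (matrix.length : Int) 1) →
    ∀ (res : List Int) (seen : PySem.Set Int),
    (∀ x : Int, x ∈ seen ↔ (x ∈ res ∧ 0 ≤ x)) →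
    L.foldl (fun res i =>
      if (PySem.List.pyGet? eliminated_rows i).getD 0 = -1 then
        if PySem.List.count (pvGetColumn matrix i) 0 = 1 ∧
           (((PySem.List.index? (pvGetColumn matrix i) 0).getD 0 : Nat) : Int) ∉ res then
          res ++ [(((PySem.List.index? (pvGetColumn matrix i) 0).getD 0 : Nat) : Int)]
        else res ++ [-1]
      else res ++ [-1]) res
    = (L.foldl (fun (acc : List Int × PySem.Set Int) i =>
        match lookup.get? i with
        | none => (acc.1 ++ [-1], acc.2)
        | some st =>
          if st.1 = 1 ∧ ¬ PySem.Set.contains acc.2 st.2 then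
            (acc.1 ++ [st.2], PySem.Set.add acc.2 st.2)
          else (acc.1 ++ [-1], acc.2)) (res, seen)).1 := by
  intro L
  induction L with
  | nil => intro _ res seen _; simp
  | cons i L ih =>
    intro hmem res seen hinv
    have hiR : i ∈ PySem.List.pyRange 0 (matrix.length : Int) 1 := hmem i (by simp)
    have hmem' : ∀ j ∈ L, j ∈ PySem.List.pyRange 0 (matrix.length : Int) 1 := by
      intro j hj; exact hmem j (by simp [hj])
    have hinvm1 : ∀ x : Int, x ∈ seen ↔ (x ∈ res ++ [-1] ∧ 0 ≤ x) := by
      intro x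
      rw [hinv x]
      constructor
      · rintro ⟨hx, h0⟩; exact ⟨List.mem_append_left _ hx, h0⟩
      · rintro ⟨hx, h0⟩
        rcases List.mem_append.1 hx with h | h
        · exact ⟨h, h0⟩
        · simp at h; omega
    simp only [List.foldl_cons]
    by_cases hel : (PySem.List.pyGet? eliminated_rows i).getD 0 = -1
    · have hlook : lookup.get? i = some (pvCnt matrix i, pvFirst matrix i) := by
        rw [hget i]; exact if_pos ⟨hel, hiR⟩
      rw [if_pos hel]
      simp only [hlook]
      by_cases hc : PySem.List.count (pvGetColumn matrix i) 0 = 1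
      · have hc' : List.count 0 (pvColv matrix i) = 1 := by
          rw [← PySem.List.count_eq, ← pvGetColumn_eq]; exact hc
        have hmem0 : (0 : Int) ∈ pvColv matrix i := by
          have : 0 < List.count 0 (pvColv matrix i) := by omega
          exact List.count_pos_iff.1 this
        obtain ⟨k, hk⟩ : ∃ k, PySem.List.index? (pvColv matrix i) 0 = some k := by
          have := (PySem.List.index?_isSome_iff (pvColv matrix i) 0).2 hmem0
          exact Option.isSome_iff_exists.1 this
        have hfirst : pvFirst matrix i = (k : Int) := by simp only [pvFirst, hk]
        have hcntI : pvCnt matrix i = 1 := by simp [pvCnt, hc']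
        have hidx : (((PySem.List.index? (pvGetColumn matrix i) 0).getD 0 : Nat) : Int)
            = (k : Int) := by rw [pvGetColumn_eq, hk]; rfl
        have h0k : (0 : Int) ≤ (k : Int) := Int.natCast_nonneg k
        have hseen : (PySem.Set.contains seen (pvFirst matrix i) = true)
            ↔ ((k : Int) ∈ res) := by
          rw [hfirst]
          simp only [PySem.Set.contains, List.contains_iff_mem]
          rw [hinv (k : Int)]
          exact ⟨fun h => h.1, fun h => ⟨h, h0k⟩⟩
        by_cases hin : ((k : Int) ∈ res)
        · -- duplicate first-zero position: both sides append -1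
          have hnA : ¬ (PySem.List.count (pvGetColumn matrix i) 0 = 1 ∧
              (((PySem.List.index? (pvGetColumn matrix i) 0).getD 0 : Nat) : Int) ∉ res) := by
            rw [hidx]; exact fun h => h.2 hin
          have hnB : ¬ ((pvCnt matrix i, pvFirst matrix i).1 = 1 ∧
              ¬ PySem.Set.contains seen (pvCnt matrix i, pvFirst matrix i).2 = true) := by
            exact fun h => h.2 (hseen.2 hin)
          rw [if_neg hnA, if_neg hnB]
          exact ih hmem' (res ++ [-1]) seen hinvm1
        · -- record the first-zero position on both sides
          have hpA : PySem.List.count (pvGetColumn matrix i) 0 = 1 ∧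
              (((PySem.List.index? (pvGetColumn matrix i) 0).getD 0 : Nat) : Int) ∉ res := by
            rw [hidx]; exact ⟨hc, hin⟩
          have hpB : (pvCnt matrix i, pvFirst matrix i).1 = 1 ∧
              ¬ PySem.Set.contains seen (pvCnt matrix i, pvFirst matrix i).2 = true := by
            exact ⟨hcntI, fun h => hin (hseen.1 h)⟩
          rw [if_pos hpA, if_pos hpB]
          simp only [hidx, hfirst]
          apply ih hmem'
          intro x
          rw [PySem.Set.mem_add, hinv x]
          constructor
          · rintro (⟨hx, h0⟩ | rfl)
            · exact ⟨List.mem_append_left _ hx, h0⟩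
            · exact ⟨List.mem_append_right _ (by simp), h0k⟩
          · rintro ⟨hx, h0⟩
            rcases List.mem_append.1 hx with h | h
            · exact Or.inl ⟨h, h0⟩
            · simp at h; exact Or.inr h
      · -- zero count ≠ 1: both sides append -1
        have hcntI : ¬ (pvCnt matrix i, pvFirst matrix i).1 = 1 := by
          simp only [pvCnt]
          intro hcontra
          apply hc
          rw [PySem.List.count_eq, pvGetColumn_eq]
          exact_mod_cast hcontra
        rw [if_neg (fun h => hc h.1), if_neg (fun h => hcntI h.1)]
        exact ih hmem' (res ++ [-1]) seen hinvm1
    · have hlook : lookup.get? i = none := by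
        rw [hget i]; exact if_neg (fun h => hel h.1)
      rw [if_neg hel]
      simp only [hlook]
      exact ih hmem' (res ++ [-1]) seen hinvm1

theorem column_scan_eq_alt (matrix : List (List Int)) (eliminated_rows : List Int) :
    column_scan matrix eliminated_rows = column_scan_alt matrix eliminated_rows := by
  have hA : column_scan matrix eliminated_rows
      = (PySem.List.pyRange 0 (matrix.length : Int) 1).foldl
          (fun res i =>
            if (PySem.List.pyGet? eliminated_rows i).getD 0 = -1 then
              if PySem.List.count (pvGetColumn matrix i) 0 = 1 ∧
                 (((PySem.List.index? (pvGetColumn matrix i) 0).getD 0 : Nat) : Int) ∉ res then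
                res ++ [(((PySem.List.index? (pvGetColumn matrix i) 0).getD 0 : Nat) : Int)]
              else res ++ [-1]
            else res ++ [-1]) [] := by
    unfold column_scan
    conv_rhs => rw [show ((matrix.length : Int)) = 0 + (matrix.length : Int) from (zero_add _).symm,
      ← PySem.List.map_fst_enumerate matrix 0, List.foldl_map]
  have hnodup : ((PySem.List.pyRange 0 ((matrix.length : Int)) 1).filter
      (fun i => (PySem.List.pyGet? eliminated_rows i).getD 0 == -1)).Nodup :=
    (PySem.List.nodup_pyRange_one 0 _).filter _
  have hstats :
      (PySem.List.enumerate matrix 0).foldl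
        (fun st p => st.map (fun q =>
          (q.1,
           if (PySem.List.pyGet? p.2 q.1).getD 0 = 0 then q.2.1 + 1 else q.2.1,
           if (PySem.List.pyGet? p.2 q.1).getD 0 = 0 ∧ q.2.2 = -1 then p.1 else q.2.2)))
        (((PySem.List.pyRange 0 (matrix.length : Int) 1).filter
          (fun i => (PySem.List.pyGet? eliminated_rows i).getD 0 == -1)).map (fun i => (i, 0, -1)))
      = ((PySem.List.pyRange 0 (matrix.length : Int) 1).filter
          (fun i => (PySem.List.pyGet? eliminated_rows i).getD 0 == -1)).map
          (fun i => (i, pvCnt matrix i, pvFirst matrix i)) := by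
    rw [pvFoldlMap (fun (p : Int × List Int) (q : Int × Int × Int) =>
          (q.1,
           if (PySem.List.pyGet? p.2 q.1).getD 0 = 0 then q.2.1 + 1 else q.2.1,
           if (PySem.List.pyGet? p.2 q.1).getD 0 = 0 ∧ q.2.2 = -1 then p.1 else q.2.2))
        (PySem.List.enumerate matrix 0)]
    rw [List.map_map]
    apply List.map_congr_left
    intro i _
    show (PySem.List.enumerate matrix 0).foldl
        (fun (q : Int × Int × Int) (p : Int × List Int) =>
          (q.1,
           if (PySem.List.pyGet? p.2 q.1).getD 0 = 0 then q.2.1 + 1 else q.2.1,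
           if (PySem.List.pyGet? p.2 q.1).getD 0 = 0 ∧ q.2.2 = -1 then p.1 else q.2.2))
        (i, 0, -1)
      = (i, pvCnt matrix i, pvFirst matrix i)
    rw [pvStatsFold matrix i 0 0 le_rfl]
    simp only [pvCnt, zero_add]
    cases h : PySem.List.index? (pvColv matrix i) 0 with
    | none => simp only [pvFirst, h]
    | some k => simp only [pvFirst, h, zero_add]
  have hget : ∀ x : Int,
      (PySem.Dict.ofList
        (((PySem.List.pyRange 0 (matrix.length : Int) 1).filter
          (fun i => (PySem.List.pyGet? eliminated_rows i).getD 0 == -1)).map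
          (fun i => (i, (pvCnt matrix i, pvFirst matrix i))))).get? x
      = if ((PySem.List.pyGet? eliminated_rows x).getD 0 = -1 ∧
            x ∈ PySem.List.pyRange 0 (matrix.length : Int) 1)
        then some (pvCnt matrix x, pvFirst matrix x) else none := by
    intro x
    rw [pvGetOfListMap _ (fun i => (pvCnt matrix i, pvFirst matrix i)) hnodup x]
    have hmemiff : x ∈ ((PySem.List.pyRange 0 (matrix.length : Int) 1).filter
          (fun i => (PySem.List.pyGet? eliminated_rows i).getD 0 == -1))
        ↔ ((PySem.List.pyGet? eliminated_rows x).getD 0 = -1 ∧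
           x ∈ PySem.List.pyRange 0 (matrix.length : Int) 1) := by
      rw [List.mem_filter]
      simp only [beq_iff_eq]
      exact and_comm
    by_cases hx : (PySem.List.pyGet? eliminated_rows x).getD 0 = -1 ∧
        x ∈ PySem.List.pyRange 0 (matrix.length : Int) 1
    · rw [if_pos (hmemiff.2 hx), if_pos hx]
    · rw [if_neg (fun h => hx (hmemiff.1 h)), if_neg hx]
  rw [hA]
  simp only [column_scan_alt]
  rw [hstats, List.map_map]
  exact pvLoop matrix eliminated_rows _ hget _ (fun i h => h) [] PySem.Set.empty
    (by intro x; simp [PySem.Set.empty])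

-- ===== VERDICT (by name: the statement is the Claim_ definition above) =====
theorem column_scan_spec : Claim_equal_column_scan := by
  intro matrix eliminated_rows _ _
  unfold Spec_column_scan
  exact column_scan_eq_alt matrix eliminated_rows
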